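-- pv_equiv track=rewrite | github.com/kjnh10/pcw | work/atcoder/arc071/D/answers/209444_oyodr.py | fn
-- ===== SOURCE A (Python) =====
-- MOD = int(1e9) + 7
--
-- def fn(ls):
--     l = len(ls)
--     ret = 0
--     for i in range(l):
--         c = l - 1 - 2 * i
--         ret += c * ls[l-i-1]
--         ret %= MOD
--     return ret
-- ===== SOURCE B (Python) =====
-- MOD = int(1e9) + 7
--
-- def fn(ls):
--     # The result is the total of all ordered pairwise differences ls[j] - ls[i]
--     # over i < j, accumulated in one pass with a running prefix sum.
--     total = 0
--     prefix = 0
--     for i, x in enumerate(ls):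
--         total += i * x - prefix
--         prefix += x
--     return total % MOD
-- ===== Notes on version B (the rewrite author's own statement) =====
-- stated objective: alternative
-- what changed: B reinterprets the result as the total of all ordered pairwise differences ls[j]-ls[i] over i<j (equal to A's weighted sum since each ls[j] gains coefficient j-(l-1-j)=2j-(l-1)) and computes it in one pass carrying a running prefix sum, adding i*ls[i]-prefix per element and reducing mod MOD once, instead of A's per-element coefficient c=l-1-2i with backward indexing and a mod after every step.
import Mathlib
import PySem

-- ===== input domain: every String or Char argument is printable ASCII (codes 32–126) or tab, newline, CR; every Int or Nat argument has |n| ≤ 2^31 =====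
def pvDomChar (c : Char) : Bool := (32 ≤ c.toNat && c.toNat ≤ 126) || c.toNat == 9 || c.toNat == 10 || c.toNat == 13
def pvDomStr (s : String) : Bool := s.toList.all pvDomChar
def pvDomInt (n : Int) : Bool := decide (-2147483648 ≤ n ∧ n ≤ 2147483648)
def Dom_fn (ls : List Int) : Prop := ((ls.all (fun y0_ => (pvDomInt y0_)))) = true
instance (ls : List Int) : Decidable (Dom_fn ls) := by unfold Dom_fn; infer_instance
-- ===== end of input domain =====

-- B computes the same value as the total of all ordered pairwise differences ls[j]-ls[i]
-- (i < j) in one pass with a running prefix sum, instead of A's per-element coefficient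
-- c = l-1-2i with backward indexing and a mod after every step (alternative).

def pvMOD : Int := 1000000007

-- ===== PORT A =====
-- loop 'for i in range(l): c = l-1-2*i; ret += c*ls[l-i-1]; ret %= MOD'; the index
-- l-i-1 is always in range for i in range(l), so pyGetD's default is never used.
def fn (ls : List Int) : Int :=
  let l : Int := ls.length
  (PySem.List.pyRange 0 l 1).foldl
    (fun ret i => PySem.Int.mod (ret + (l - 1 - 2 * i) * PySem.List.pyGetD ls (l - i - 1) 0) pvMOD)
    0

-- ===== PORT B =====
-- 'for i, x in enumerate(ls): total += i*x - prefix; prefix += x; return total % MOD'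
def fn_alt (ls : List Int) : Int :=
  let st := (PySem.List.enumerate ls 0).foldl
    (fun (st : Int × Int) q => (st.1 + q.1 * q.2 - st.2, st.2 + q.2)) (0, 0)
  PySem.Int.mod st.1 pvMOD

-- ===== PRECONDITION & SPEC =====
def Spec_fn (ls : List Int) (out : Int) : Prop := out = fn_alt ls
instance (ls : List Int) (out : Int) : Decidable (Spec_fn ls out) := by unfold Spec_fn; infer_instance

-- ===== CLAIM (what is proved, stated in full; the proofs are below) =====
def Claim_equal_fn : Prop := ∀ (ls : List Int), Dom_fn ls → Spec_fn ls (fn ls)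

-- ===== LEMMAS AND PROOFS =====

theorem pv_mod_emod (x : Int) : PySem.Int.mod x pvMOD = x % pvMOD :=
  PySem.Int.mod_eq_emod_of_pos (by norm_num [pvMOD])

-- A's loop with a mod after every step equals the whole sum taken mod once (nonempty list).
theorem pv_foldl_mod (t : Int → Int) :
    ∀ (L : List Int) (r : Int), L ≠ [] →
      L.foldl (fun ret i => PySem.Int.mod (ret + t i) pvMOD) r
        = (r + (L.map t).sum) % pvMOD := by
  intro L
  induction L with
  | nil => intro r h; exact absurd rfl h
  | cons i L ih =>
    intro r _
    cases L with
    | nil => simp [pv_mod_emod]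
    | cons j L' =>
      rw [List.foldl_cons, ih _ (by simp), pv_mod_emod, Int.emod_add_emod]
      simp [add_assoc]

-- sums over pyRange 0 n 1 are Finset.range sums
theorem pv_sum_pyRange (n : ℕ) (f : Int → Int) :
    ((PySem.List.pyRange 0 (n : Int) 1).map f).sum = ∑ k ∈ Finset.range n, f (k : Int) := by
  rw [PySem.List.pyRange_one]
  simp [List.map_map, Function.comp_def]
  rfl

-- the 'prefix contributions' accumulated by B's loop: element j (of n) is counted n-1-j times
def pvW : List Int → Int
  | [] => 0
  | x :: xs => (xs.length : Int) * x + pvW xs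

-- B's fold, closed form: first component = initial total + Σ i*x − n·(initial prefix) − pvW
theorem pv_fold_B :
    ∀ (L : List (Int × Int)) (t p : Int),
      (L.foldl (fun (st : Int × Int) q => (st.1 + q.1 * q.2 - st.2, st.2 + q.2)) (t, p)).1
        = t + (L.map (fun q => q.1 * q.2)).sum - (L.length : Int) * p - pvW (L.map Prod.snd) := by
  intro L
  induction L with
  | nil => intro t p; simp [pvW]
  | cons q L ih =>
    intro t p
    rw [List.foldl_cons, ih, List.map_cons, List.map_cons, List.length_cons, pvW]
    simp only [List.length_map, List.sum_cons]
    push_cast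
    ring

-- pvW as a Finset.range sum of the list's entries
theorem pv_pvW_sum :
    ∀ (xs : List Int), pvW xs
      = ∑ k ∈ Finset.range xs.length, ((xs.length : Int) - 1 - k) * xs.getD k 0 := by
  intro xs
  induction xs with
  | nil => simp [pvW]
  | cons x xs ih =>
    rw [pvW, ih]
    simp only [List.length_cons]
    rw [Finset.sum_range_succ']
    simp only [List.getD_cons_succ, List.getD_cons_zero]
    push_cast
    ring_nf

-- ===== VERDICT (by name: the statement is the Claim_ definition above) =====
theorem fn_spec : Claim_equal_fn := by
  intro ls _
  unfold Spec_fn fn fn_alt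
  simp only []
  rcases eq_or_ne ls [] with rfl | hne
  · decide
  · have hn : ls.length ≠ 0 := by simpa using hne
    set n : ℕ := ls.length with hlen
    -- B side: closed form of the pair-state fold
    rw [pv_fold_B, PySem.List.map_snd_enumerate, pv_mod_emod]
    -- A side: nonempty range, fold = sum mod
    have hrange : PySem.List.pyRange 0 (n : Int) 1 ≠ [] := by
      have : (0 : Int) < (n : Int) := by exact_mod_cast Nat.pos_of_ne_zero hn
      rw [PySem.List.pyRange_one_cons this]; simp
    rw [pv_foldl_mod _ _ _ hrange]
    simp only [PySem.List.length_enumerate, mul_zero, sub_zero, zero_add]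
    -- express both sides as Finset.range sums over getD
    have henum : PySem.List.enumerate ls 0
        = (PySem.List.pyRange 0 (n : Int) 1).map (fun j => (j, PySem.List.pyGetD ls j 0)) := by
      simpa [hlen] using PySem.List.enumerate_eq_map_pyRange (xs := ls) (d := (0 : Int))
    rw [henum, List.map_map, pv_pvW_sum, pv_sum_pyRange, pv_sum_pyRange]
    congr 1
    -- reflect A's backward-indexed sum, then compare term by term
    have hreflect : ∑ k ∈ Finset.range n,
        ((n : Int) - 1 - 2 * k) * PySem.List.pyGetD ls ((n : Int) - k - 1) 0
        = ∑ k ∈ Finset.range n,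
            (2 * (k : Int) - ((n : Int) - 1)) * PySem.List.pyGetD ls (k : Int) 0 := by
      rw [← Finset.sum_range_reflect]
      apply Finset.sum_congr rfl
      intro k hk
      have hk' : k < n := Finset.mem_range.mp hk
      have h1 : ((n - 1 - k : ℕ) : Int) = (n : Int) - 1 - k := by omega
      rw [h1]
      have h2 : (n : Int) - ((n : Int) - 1 - k) - 1 = (k : Int) := by ring
      rw [h2]
      ring_nf
    rw [hreflect, ← hlen, ← Finset.sum_sub_distrib]
    apply Finset.sum_congr rfl
    intro k hk
    have hk' : k < n := Finset.mem_range.mp hk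
    have hg : PySem.List.pyGetD ls (k : Int) 0 = ls.getD k 0 := by
      simp [PySem.List.pyGetD_natCast]
    simp only [Function.comp_def]
    rw [hg]
    ring
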